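-- pv_equiv track=rewrite | github.com/cirosantilli/project-euler-solvers | solvers/639.py | power_sum_large
-- ===== SOURCE A (Python) =====
-- MOD = 1_000_000_007
--
-- def power_sum_large(t: int, k: int, row):
--     """
--     Compute sum_{m<=t} m^k mod MOD using the falling-factorial formula:
--       sum_{m=1}^t m^k = sum_{j=1}^k S2(k,j)/(j+1) * (t+1)_{j+1}
--     where (t+1)_{j+1} is the falling factorial:
--       (t+1)*(t)*...*(t-j)
--     """
--     n = t % MOD
--     prod = (n + 1) % MOD  # will become (n+1)_{j+1} after multiplying factors
--     res = 0
--     for j in range(1, k + 1):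
--         prod = (prod * ((n + 1 - j) % MOD)) % MOD
--         res = (res + row[j] * prod) % MOD
--     return res
-- ===== SOURCE B (Python) =====
-- MOD = 1_000_000_007
--
-- def power_sum_large(t: int, k: int, row):
--     """Same value as A, via Horner's nested form: factor (n+1) out, slice the
--     coefficients row[1:k+1] once, and fold the reversed slice with a single
--     multiply-add accumulator (no running falling-factorial product)."""
--     n = t % MOD
--     if k <= 0:
--         return 0
--     acc = 0
--     for i, c in enumerate(reversed(row[1:k + 1])):
--         acc = (n + 1 - k + i) % MOD * (c + acc) % MOD
--     return (n + 1) % MOD * acc % MOD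
-- ===== Notes on version B (the rewrite author's own statement) =====
-- stated objective: alternative
-- what changed: A's forward index loop with two running accumulators (falling-factorial product and sum) is replaced by Horner's nested form: the (n+1) factor is pulled out, the coefficients row[1:k+1] are sliced once, and the reversed slice is folded with a single multiply-add accumulator and no product variable.
import Mathlib
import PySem

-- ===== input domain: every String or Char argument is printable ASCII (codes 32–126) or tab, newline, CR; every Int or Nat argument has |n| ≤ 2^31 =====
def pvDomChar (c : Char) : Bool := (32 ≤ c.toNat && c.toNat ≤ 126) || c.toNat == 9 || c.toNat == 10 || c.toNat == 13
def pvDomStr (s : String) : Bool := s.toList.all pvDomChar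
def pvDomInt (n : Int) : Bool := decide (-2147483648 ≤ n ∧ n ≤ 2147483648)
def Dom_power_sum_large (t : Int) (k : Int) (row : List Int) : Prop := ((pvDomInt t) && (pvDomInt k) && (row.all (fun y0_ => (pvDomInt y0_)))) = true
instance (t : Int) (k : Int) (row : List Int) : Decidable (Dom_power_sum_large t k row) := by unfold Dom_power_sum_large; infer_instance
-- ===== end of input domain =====

-- B evaluates the same modular sum in Horner's nested form: it slices the coefficients
-- row[1:k+1] once and folds the reversed slice with one multiply-add accumulator,
-- with no index-range loop and no running falling-factorial product; objective: alternative.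

-- ===== PORT A =====
-- forward loop over range(1, k+1): prod accumulates the falling factorial, res the running sum.
-- row[j] is ported as pyGetD row j 0: the default is never reached under Pre_ (Python raises IndexError there).
def power_sum_large (t : Int) (k : Int) (row : List Int) : Int :=
  let n := PySem.Int.mod t 1000000007
  let st := (PySem.List.pyRange 1 (k + 1) 1).foldl
    (fun (st : Int × Int) (j : Int) =>
      let prod := PySem.Int.mod (st.1 * PySem.Int.mod (n + 1 - j) 1000000007) 1000000007
      (prod, PySem.Int.mod (st.2 + PySem.List.pyGetD row j 0 * prod) 1000000007))
    (PySem.Int.mod (n + 1) 1000000007, 0)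
  st.2

-- ===== PORT B =====
-- early 0 for k <= 0; otherwise fold enumerate(reversed(row[1:k+1])) with one accumulator.
def power_sum_large_alt (t : Int) (k : Int) (row : List Int) : Int :=
  let n := PySem.Int.mod t 1000000007
  if k ≤ 0 then 0
  else
    let acc := (PySem.List.enumerate (PySem.List.slice row (some 1) (some (k + 1))).reverse 0).foldl
      (fun (acc : Int) (ic : Int × Int) =>
        PySem.Int.mod (PySem.Int.mod (n + 1 - k + ic.1) 1000000007 * (ic.2 + acc)) 1000000007)
      0
    PySem.Int.mod (PySem.Int.mod (n + 1) 1000000007 * acc) 1000000007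

-- ===== PRECONDITION & SPEC =====
-- Pre_ excludes exactly the inputs where Python's row[j] raises IndexError (some j with 1 ≤ j ≤ k out of range).
def Pre_power_sum_large (t : Int) (k : Int) (row : List Int) : Prop :=
  k ≤ 0 ∨ k < (row.length : Int)
instance (t : Int) (k : Int) (row : List Int) : Decidable (Pre_power_sum_large t k row) := by
  unfold Pre_power_sum_large; infer_instance
def pvWitness_power_sum_large : Int × Int × List Int := (10, 2, [0, 1, 3])
def Spec_power_sum_large (t : Int) (k : Int) (row : List Int) (out : Int) : Prop := out = power_sum_large_alt t k row
instance (t : Int) (k : Int) (row : List Int) (out : Int) : Decidable (Spec_power_sum_large t k row out) := by unfold Spec_power_sum_large; infer_instance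

-- ===== CLAIM (what is proved, stated in full; the proofs are below) =====
def Claim_equal_power_sum_large : Prop := ∀ (t : Int) (k : Int) (row : List Int), Dom_power_sum_large t k row → Pre_power_sum_large t k row → Spec_power_sum_large t k row (power_sum_large t k row)

-- ===== LEMMAS AND PROOFS =====

theorem pmod_eq (x : Int) : PySem.Int.mod x 1000000007 = x % 1000000007 :=
  PySem.Int.mod_eq_emod_of_pos (by norm_num)

theorem cast_emod (a : Int) :
    ((a % (1000000007 : Int) : Int) : ZMod 1000000007) = (a : ZMod 1000000007) := by
  have := ZMod.intCast_mod a 1000000007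
  push_cast at this ⊢; exact_mod_cast this

theorem int_eq_of_zmod (a b : Int) (h0a : 0 ≤ a) (hA : a < 1000000007)
    (h0b : 0 ≤ b) (hB : b < 1000000007)
    (h : (a : ZMod 1000000007) = (b : ZMod 1000000007)) : a = b := by
  rw [ZMod.intCast_eq_intCast_iff] at h
  have h2 : a % (1000000007 : Int) = b % (1000000007 : Int) := by exact_mod_cast h
  rw [Int.emod_eq_of_lt h0a hA, Int.emod_eq_of_lt h0b hB] at h2; exact h2

-- the Horner value of A's sum, driven by the INDEX list (A's loop variable)
def hornerZ (n : Int) (row : List Int) : List Int → ZMod 1000000007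
  | [] => 0
  | j :: L => ((n + 1 - j : Int) : ZMod 1000000007) *
      (((PySem.List.pyGetD row j 0 : Int) : ZMod 1000000007) + hornerZ n row L)

-- the Horner value of B's fold, driven by the COEFFICIENT list (B's slice) and a start index
def hornerC (n : Int) : List Int → Int → ZMod 1000000007
  | [], _ => 0
  | c :: cs, j => ((n + 1 - j : Int) : ZMod 1000000007) *
      ((c : ZMod 1000000007) + hornerC n cs (j + 1))

-- invariant of A's forward loop
theorem foldA_inv (n : Int) (row : List Int) (L : List Int) (p r : Int) :
    (((L.foldl
      (fun (st : Int × Int) (j : Int) =>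
        let prod := (st.1 * ((n + 1 - j) % 1000000007)) % 1000000007
        (prod, (st.2 + PySem.List.pyGetD row j 0 * prod) % 1000000007))
      (p, r)).2 : ZMod 1000000007)
        = (r : ZMod 1000000007) + (p : ZMod 1000000007) * hornerZ n row L)
    ∧ (0 ≤ r → r < 1000000007 →
        0 ≤ (L.foldl
      (fun (st : Int × Int) (j : Int) =>
        let prod := (st.1 * ((n + 1 - j) % 1000000007)) % 1000000007
        (prod, (st.2 + PySem.List.pyGetD row j 0 * prod) % 1000000007))
      (p, r)).2
        ∧ (L.foldl
      (fun (st : Int × Int) (j : Int) =>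
        let prod := (st.1 * ((n + 1 - j) % 1000000007)) % 1000000007
        (prod, (st.2 + PySem.List.pyGetD row j 0 * prod) % 1000000007))
      (p, r)).2 < 1000000007) := by
  induction L generalizing p r with
  | nil => exact ⟨by simp [hornerZ], fun h1 h2 => ⟨h1, h2⟩⟩
  | cons j L ih =>
    simp only [List.foldl_cons]
    obtain ⟨ih1, ih2⟩ := ih ((p * ((n + 1 - j) % 1000000007)) % 1000000007)
      ((r + PySem.List.pyGetD row j 0 * ((p * ((n + 1 - j) % 1000000007)) % 1000000007)) % 1000000007)
    constructor
    · rw [ih1, hornerZ]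
      push_cast [cast_emod]
      ring
    · intro _ _
      exact ih2 (Int.emod_nonneg _ (by norm_num)) (Int.emod_lt_of_pos _ (by norm_num))

-- B's fold over enumerate(cs.reverse) computes the Horner value of the coefficient list
theorem foldB_eq (n : Int) : ∀ (cs : List Int) (j : Int),
    (((PySem.List.enumerate cs.reverse 0).foldl
      (fun (a : Int) (p : Int × Int) =>
        (((n + 2 - j - (cs.length : Int) + p.1) % 1000000007) * (p.2 + a)) % 1000000007)
      0 : Int) : ZMod 1000000007) = hornerC n cs j := by
  intro cs
  induction cs with
  | nil => simp [hornerC]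
  | cons c cs ih =>
    intro j
    have hrev : (c :: cs).reverse = cs.reverse ++ [c] := by simp
    have hfun : (fun (a : Int) (p : Int × Int) =>
        (((n + 2 - j - ((c :: cs).length : Int) + p.1) % 1000000007) * (p.2 + a)) % 1000000007)
        = (fun (a : Int) (p : Int × Int) =>
        (((n + 2 - (j + 1) - (cs.length : Int) + p.1) % 1000000007) * (p.2 + a)) % 1000000007) := by
      funext a p
      have h : n + 2 - j - ((c :: cs).length : Int) + p.1
          = n + 2 - (j + 1) - (cs.length : Int) + p.1 := by
        push_cast [List.length_cons]; ring
      rw [h]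
    rw [hrev, PySem.List.enumerate_append, List.foldl_append, hfun]
    have henum : PySem.List.enumerate [c] (0 + (cs.reverse.length : Int))
        = [((cs.length : Int), c)] := by
      simp [PySem.List.enumerate]
    rw [henum]
    simp only [List.foldl_cons, List.foldl_nil]
    have harg : n + 2 - (j + 1) - (cs.length : Int) + (cs.length : Int) = n + 1 - j := by ring
    rw [harg, hornerC, ← ih (j + 1)]
    push_cast [cast_emod]
    ring

-- when the coefficient list is row's segment starting at index j, the two Horner values agree
theorem hornerC_eq_hornerZ (n : Int) (row : List Int) : ∀ (cs : List Int) (j : Int),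
    (∀ (i : Nat), (h : i < cs.length) → cs[i] = PySem.List.pyGetD row (j + (i : Int)) 0) →
    hornerC n cs j = hornerZ n row (PySem.List.pyRange j (j + (cs.length : Int)) 1) := by
  intro cs
  induction cs with
  | nil =>
    intro j _
    simp only [List.length_nil, Nat.cast_zero, add_zero]
    rw [PySem.List.pyRange_of_pos j j (by norm_num)]
    simp [hornerC, hornerZ]
  | cons c cs ih =>
    intro j h
    have hlt : j < j + (((c :: cs).length : Int)) := by
      have : (0:Int) < ((c :: cs).length : Int) := by exact_mod_cast cs.length.succ_pos
      omega
    rw [PySem.List.pyRange_one_cons hlt]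
    have hb : j + (((c :: cs).length : Int)) = (j + 1) + ((cs.length : Int)) := by
      push_cast [List.length_cons]; ring
    rw [hb, hornerZ, hornerC]
    have hc : c = PySem.List.pyGetD row j 0 := by
      have := h 0 (by simp)
      simpa using this
    rw [← hc, ih (j + 1) (fun i hi => by
      have := h (i + 1) (by simpa using Nat.succ_lt_succ hi)
      simpa [add_assoc, add_comm, add_left_comm] using this)]

theorem power_sum_large_eq (t k : Int) (row : List Int)
    (hpre : Pre_power_sum_large t k row) :
    power_sum_large t k row = power_sum_large_alt t k row := by
  unfold power_sum_large power_sum_large_alt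
  by_cases hk : k ≤ 0
  · -- A's range is empty, B takes the early-0 branch
    have hnil : PySem.List.pyRange 1 (k + 1) 1 = [] := by
      rw [PySem.List.pyRange_of_pos 1 (k + 1) (by norm_num)]
      have : ¬ ((1:Int) < k + 1) := by omega
      simp [this]
    simp [hnil, hk]
  · simp only [if_neg hk]
    have hk1 : 1 ≤ k := by omega
    have hklen : k < (row.length : Int) := by
      rcases hpre with h | h
      · omega
      · exact h
    -- the slice row[1:k+1]
    set s := PySem.List.slice row (some 1) (some (k + 1)) with hs
    have hs_eq : s = List.take k.toNat (List.drop 1 row) := by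
      rw [hs, PySem.List.slice_toNat row (by norm_num) (by omega)]
      have : (k + 1).toNat - (1:Int).toNat = k.toNat := by omega
      rw [this]; norm_num
    have hs_len : s.length = k.toNat := by
      rw [hs_eq]
      simp
      omega
    have hs_lenInt : ((s.length : Nat) : Int) = k := by
      rw [hs_len]; omega
    have hs_idx : ∀ (i : Nat), (h : i < s.length) →
        s[i] = PySem.List.pyGetD row ((1:Int) + (i : Int)) 0 := by
      intro i hi
      have hi' : i < k.toNat := by omega
      have hlen : 1 + i < row.length := by omega
      have h1 : s[i] = row[1 + i] := by
        have hgg := List.getElem_of_eq hs_eq hi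
        rw [hgg]
        simp only [List.getElem_take, List.getElem_drop]
      have h2 : ((1:Int) + (i : Int)) = (((1 + i : Nat) : Int)) := by push_cast; ring
      rw [h1, h2, PySem.List.pyGetD_natCast]
      exact (List.getD_eq_getElem row 0 hlen).symm
    -- rewrite B's fold function to the shape of foldB_eq
    have hfun : (fun (acc : Int) (ic : Int × Int) =>
        PySem.Int.mod (PySem.Int.mod ((PySem.Int.mod t 1000000007) + 1 - k + ic.1) 1000000007 * (ic.2 + acc)) 1000000007)
        = (fun (a : Int) (p : Int × Int) =>
        ((((PySem.Int.mod t 1000000007) + 2 - 1 - (s.length : Int) + p.1) % 1000000007) * (p.2 + a)) % 1000000007) := by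
      funext a p
      rw [pmod_eq, pmod_eq]
      have : (PySem.Int.mod t 1000000007) + 1 - k + p.1
          = (PySem.Int.mod t 1000000007) + 2 - 1 - (s.length : Int) + p.1 := by
        rw [hs_lenInt]; ring
      rw [this]
    rw [hfun]
    -- both sides into ZMod
    obtain ⟨hA, hbound⟩ := foldA_inv (PySem.Int.mod t 1000000007) row (PySem.List.pyRange 1 (k + 1) 1)
      (PySem.Int.mod ((PySem.Int.mod t 1000000007) + 1) 1000000007) 0
    have hAmod : (fun (st : Int × Int) (j : Int) =>
        let prod := PySem.Int.mod (st.1 * PySem.Int.mod ((PySem.Int.mod t 1000000007) + 1 - j) 1000000007) 1000000007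
        (prod, PySem.Int.mod (st.2 + PySem.List.pyGetD row j 0 * prod) 1000000007))
        = (fun (st : Int × Int) (j : Int) =>
        let prod := (st.1 * (((PySem.Int.mod t 1000000007) + 1 - j) % 1000000007)) % 1000000007
        (prod, (st.2 + PySem.List.pyGetD row j 0 * prod) % 1000000007)) := by
      funext st j; simp
    rw [hAmod] at *
    obtain ⟨hb0, hb1⟩ := hbound le_rfl (by norm_num)
    rw [pmod_eq] at *
    apply int_eq_of_zmod _ _ hb0 hb1
      (by rw [pmod_eq]; exact Int.emod_nonneg _ (by norm_num))
      (by rw [pmod_eq]; exact Int.emod_lt_of_pos _ (by norm_num))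
    rw [hA]
    have hB := foldB_eq (t % 1000000007) s 1
    have hCZ := hornerC_eq_hornerZ (t % 1000000007) row s 1 hs_idx
    have hrange : (1:Int) + (s.length : Int) = k + 1 := by rw [hs_lenInt]; ring
    rw [hrange] at hCZ
    rw [pmod_eq, pmod_eq, cast_emod]
    push_cast [cast_emod]
    rw [hB, hCZ]
    ring

-- ===== VERDICT (by name: the statement is the Claim_ definition above) =====
theorem power_sum_large_spec : Claim_equal_power_sum_large := by
  intro t k row _ hpre
  unfold Spec_power_sum_large
  exact power_sum_large_eq t k row hpre
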